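-- pv_equiv track=rewrite | github.com/kylegong/advent-of-code | aoc2020/day24.py | parse
-- ===== SOURCE A (Python) =====
-- def parse(line):
--     directions = []
--     for d in line:
--         if (len(directions) > 0
--             and d in ('e', 'w')
--                 and directions[-1] in ('n', 's')):
--             directions[-1] += d
--             continue
--         directions.append(d)
--     return directions
-- ===== SOURCE B (Python) =====
-- import re
--
-- def parse(line):
--     # One regex pass: a north/south char glued to a following east/west char
--     # forms one token, otherwise any single character (DOTALL so '\n' matches '.').
--     return re.findall(r'[ns][ew]|.', line, re.DOTALL)
-- ===== Notes on version B (the rewrite author's own statement) =====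
-- stated objective: idiomatic
-- what changed: Replaced the explicit loop that mutates the accumulator's last element (one-char lookback merge) with a single regex findall r'[ns][ew]|.' (DOTALL) whose engine does the tokenization in one lookahead pass.
import Mathlib
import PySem

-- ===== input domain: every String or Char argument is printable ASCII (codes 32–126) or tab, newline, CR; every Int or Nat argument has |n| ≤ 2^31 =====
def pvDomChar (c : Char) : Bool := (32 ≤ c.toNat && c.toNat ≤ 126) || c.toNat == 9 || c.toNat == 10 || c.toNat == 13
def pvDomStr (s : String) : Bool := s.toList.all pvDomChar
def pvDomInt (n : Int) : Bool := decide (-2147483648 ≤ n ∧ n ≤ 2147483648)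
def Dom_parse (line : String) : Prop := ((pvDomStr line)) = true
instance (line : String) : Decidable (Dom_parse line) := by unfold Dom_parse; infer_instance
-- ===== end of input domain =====

-- B replaces A's in-place lookback merge loop with a regex tokenizer (idiomatic, same cost).

-- ===== PORT A =====
-- one iteration of A's loop: merge d into the last token when it is "n"/"s" and d is e/w
def parseStep (directions : List String) (d : Char) : List String :=
  if directions.length > 0 ∧ (d = 'e' ∨ d = 'w') ∧
     (directions.getLast? = some "n" ∨ directions.getLast? = some "s")
  then directions.dropLast ++ [(directions.getLastD "").push d]   -- directions[-1] += d
  else directions ++ [d.toString]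

def parse (line : String) : List String :=
  line.toList.foldl parseStep []

-- ===== PORT B =====
-- hand port of re.findall(r'[ns][ew]|.', line, re.DOTALL): at each position the engine
-- greedily matches [ns][ew] (two chars) else '.' with DOTALL (any one char); exact on all inputs.
def parseAltCore : List Char → List String
  | [] => []
  | [a] => [a.toString]
  | a :: b :: rest =>
    if (a = 'n' ∨ a = 's') ∧ (b = 'e' ∨ b = 'w')
    then String.ofList [a, b] :: parseAltCore rest
    else a.toString :: parseAltCore (b :: rest)

def parse_alt (line : String) : List String :=
  parseAltCore line.toList

-- ===== PRECONDITION & SPEC =====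
def Spec_parse (line : String) (out : List String) : Prop := out = parse_alt line
instance (line : String) (out : List String) : Decidable (Spec_parse line out) := by unfold Spec_parse; infer_instance

-- ===== CLAIM (what is proved, stated in full; the proofs are below) =====
def Claim_equal_parse : Prop := ∀ (line : String), Dom_parse line → Spec_parse line (parse line)

-- ===== LEMMAS AND PROOFS =====

theorem parseStep_nomerge (acc : List String) (a : Char)
    (h : ¬((a = 'e' ∨ a = 'w') ∧ (acc.getLast? = some "n" ∨ acc.getLast? = some "s"))) :
    parseStep acc a = acc ++ [a.toString] := by
  unfold parseStep
  rw [if_neg]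
  rintro ⟨-, h1, h2⟩
  exact h ⟨h1, h2⟩

theorem parseStep_merge (acc : List String) (s : String) (a : Char)
    (hlast : acc.getLast? = some s) (hs : s = "n" ∨ s = "s") (ha : a = 'e' ∨ a = 'w') :
    parseStep acc a = acc.dropLast ++ [s.push a] := by
  have hne : acc ≠ [] := by rintro rfl; simp at hlast
  unfold parseStep
  rw [if_pos]
  · rw [List.getLastD_eq_getLast?, hlast]; rfl
  · refine ⟨by simpa [List.length_pos_iff] using hne, ha, ?_⟩
    rcases hs with rfl | rfl
    · exact Or.inl hlast
    · exact Or.inr hlast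

theorem toString_n_or_s {a : Char} (h : a.toString = "n" ∨ a.toString = "s") :
    a = 'n' ∨ a = 's' := by
  rcases h with h | h
  · left; have := congrArg String.toList h; simpa [Char.toString] using this
  · right; have := congrArg String.toList h; simpa [Char.toString] using this

-- loop invariant: if the accumulator's last token cannot merge with the head of l,
-- A's fold just appends B's tokenization of l
theorem foldl_parseStep_eq (l : List Char) :
    ∀ (acc : List String),
      ((acc.getLast? = some "n" ∨ acc.getLast? = some "s") →
        ∀ c, l.head? = some c → ¬(c = 'e' ∨ c = 'w')) →
      List.foldl parseStep acc l = acc ++ parseAltCore l := by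
  fun_induction parseAltCore l with
  | case1 => intro acc _; simp
  | case2 a =>
    intro acc hok
    rw [List.foldl_cons, List.foldl_nil,
        parseStep_nomerge acc a (fun ⟨hew, hns⟩ => hok hns a rfl hew)]
  | case3 a b rest hab ih =>
    intro acc hok
    obtain ⟨hans, hbew⟩ := hab
    have ha_not_ew : ¬(a = 'e' ∨ a = 'w') := by
      rcases hans with rfl | rfl <;> simp
    rw [List.foldl_cons, parseStep_nomerge acc a (fun ⟨hew, _⟩ => ha_not_ew hew)]
    have hans' : a.toString = "n" ∨ a.toString = "s" := by
      rcases hans with rfl | rfl <;> [left; right] <;> rfl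
    rw [List.foldl_cons,
        parseStep_merge (acc ++ [a.toString]) a.toString b (by simp) hans' hbew]
    have hpush : a.toString.push b = String.ofList [a, b] := by
      apply String.toList_injective ?_
      simp
    rw [List.dropLast_concat, hpush, ih]
    · simp
    · intro hns c _ _
      have hx : (acc ++ [String.ofList [a, b]]).getLast? = some (String.ofList [a, b]) := by
        simp
      rw [hx] at hns
      rcases hns with h | h <;>
        · have := congrArg String.toList (Option.some.inj h); simp at this
  | case4 a b rest hab ih =>
    intro acc hok
    rw [List.foldl_cons, parseStep_nomerge acc a (fun ⟨hew, hns⟩ => hok hns a rfl hew)]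
    rw [ih]
    · simp
    · intro hns c hc hcew
      have hx : (acc ++ [a.toString]).getLast? = some a.toString := by simp
      rw [hx] at hns
      have hns' : a.toString = "n" ∨ a.toString = "s" := by
        rcases hns with h | h <;> [left; right] <;> exact Option.some.inj h
      obtain rfl : b = c := by simpa using hc
      exact hab ⟨toString_n_or_s hns', hcew⟩

-- ===== VERDICT (by name: the statement is the Claim_ definition above) =====
theorem parse_spec : Claim_equal_parse := by
  intro line _
  unfold Spec_parse parse parse_alt
  rw [foldl_parseStep_eq _ []]
  · simp
  · simp
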